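-- pv_equiv track=rewrite | github.com/REFunction/Japanese-Song-Romaji | yahoo.py | remove_not_alpha
-- ===== SOURCE A (Python) =====
-- def is_alpha(c):
--     alphabet = 'abcdefghijklmnopqrstuvwxyzABCDEFGHIJKLMNOPQRSTUVWXYZ'
--     return c in alphabet
--
-- def remove_not_alpha(s):
--     result = ''
--     for c in s:
--         if is_alpha(c) or c == ' ':
--             result += c
--     while len(result) >= 1 and result[0] == ' ':
--         result = result[1:]
--     if len(result) >= 1:
--         result = result[0].upper() + result[1:]
--     elif len(result) == 1:
--         result = result[0].upper()
--     while '  ' in result: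
--         result = result.replace('  ', ' ')
--     return result
-- ===== SOURCE B (Python) =====
-- def remove_not_alpha(s):
--     # One pass: keep letters (uppercasing the first kept char), emit a space only
--     # after a non-space output character; leading spaces and runs collapse for free.
--     out = []
--     for c in s:
--         if ('a' <= c <= 'z') or ('A' <= c <= 'Z'):
--             out.append(c.upper() if not out else c)
--         elif c == ' ' and out and out[-1] != ' ':
--             out.append(' ')
--     return ''.join(out)
-- ===== Notes on version B (the rewrite author's own statement) =====
-- stated objective: alternative
-- what changed: A makes four passes over the data (filter into a growing string, a while-loop stripping leading spaces, capitalize the first char, then a whole-string replace repeated until no double space remains); B builds the output in one left-to-right pass, uppercasing the first emitted letter and emitting a space only when the output is non-empty and does not already end in a space.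
import Mathlib
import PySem

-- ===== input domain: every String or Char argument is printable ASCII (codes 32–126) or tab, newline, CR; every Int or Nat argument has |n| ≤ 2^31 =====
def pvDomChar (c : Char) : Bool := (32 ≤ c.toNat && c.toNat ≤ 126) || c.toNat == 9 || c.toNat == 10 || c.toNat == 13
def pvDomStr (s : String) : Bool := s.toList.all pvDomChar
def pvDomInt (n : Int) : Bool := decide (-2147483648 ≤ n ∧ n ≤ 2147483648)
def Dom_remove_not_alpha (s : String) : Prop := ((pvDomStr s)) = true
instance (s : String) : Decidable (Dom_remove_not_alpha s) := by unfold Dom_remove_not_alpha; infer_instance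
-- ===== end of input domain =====

-- B replaces A's four passes (filter, lstrip loop, capitalize, repeated `replace('  ',' ')` loop)
-- by a single left-to-right pass maintaining the output; return values proved equal on Dom.

-- ===== PORT A =====
def pvAlphabet : String := "abcdefghijklmnopqrstuvwxyzABCDEFGHIJKLMNOPQRSTUVWXYZ"

-- `c in alphabet` (substring membership of the 1-char string)
def is_alpha (c : Char) : Bool := PySem.Chars.isIn [c] pvAlphabet.toList

-- `result = ''; for c in s: if is_alpha(c) or c == ' ': result += c`
def rnaFilter (l : List Char) : List Char :=
  l.foldl (fun r c => if is_alpha c || c == ' ' then r ++ [c] else r) []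

-- `while len(result) >= 1 and result[0] == ' ': result = result[1:]`
def rnaStrip : List Char → List Char
  | [] => []
  | c :: t => if c == ' ' then rnaStrip t else c :: t

-- `while '  ' in result: result = result.replace('  ', ' ')`; each replace done while
-- '  ' is present strictly shortens the string, so fuel = current length bounds the loop
def rnaCollapse : Nat → List Char → List Char
  | 0, r => r
  | fuel+1, r =>
    if PySem.Chars.isIn [' ', ' '] r then rnaCollapse fuel (PySem.Chars.replace r [' ', ' '] [' '])
    else r

-- `if len(result) >= 1: result = result[0].upper() + result[1:] elif len(result) == 1: ...`
def rnaCapFirst (r2 : List Char) : List Char :=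
  if r2.length ≥ 1 then PySem.Chars.upperChar r2.headI :: r2.tail
  else if r2.length == 1 then [PySem.Chars.upperChar r2.headI] else r2

def remove_not_alpha (s : String) : String :=
  let r3 := rnaCapFirst (rnaStrip (rnaFilter s.toList))
  String.ofList (rnaCollapse r3.length r3)

-- ===== PORT B =====
-- one pass: `out` list; letters appended (first one uppercased), a space appended only
-- after a non-space output character; ''.join(out) at the end
def remove_not_alpha_alt (s : String) : String :=
  String.ofList (s.toList.foldl (fun out c =>
    if ('a' ≤ c && c ≤ 'z') || ('A' ≤ c && c ≤ 'Z') then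
      out ++ [if out.isEmpty then PySem.Chars.upperChar c else c]
    else if c == ' ' && !out.isEmpty && out.getLast? != some ' ' then out ++ [' ']
    else out) [])

-- ===== PRECONDITION & SPEC =====
def Spec_remove_not_alpha (s : String) (out : String) : Prop := out = remove_not_alpha_alt s
instance (s : String) (out : String) : Decidable (Spec_remove_not_alpha s out) := by unfold Spec_remove_not_alpha; infer_instance

-- ===== CLAIM (what is proved, stated in full; the proofs are below) =====
def Claim_equal_remove_not_alpha : Prop := ∀ (s : String), Dom_remove_not_alpha s → Spec_remove_not_alpha s (remove_not_alpha s)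

-- ===== LEMMAS AND PROOFS =====

-- A's keep-predicate, B's letter test, and the reference pipeline
def rnaKeep (c : Char) : Bool := is_alpha c || c == ' '
def rnaLetter (c : Char) : Bool := ('a' ≤ c && c ≤ 'z') || ('A' ≤ c && c ≤ 'Z')

-- one-pass versions of `replace('  ',' ')` and of the full collapse, used to reason about A
def rnaRep : List Char → List Char
  | [] => []
  | ' ' :: ' ' :: t => ' ' :: rnaRep t
  | c :: t => c :: rnaRep t

def rnaSqueeze : List Char → List Char
  | [] => []
  | [c] => [c]
  | a :: b :: t => if a == ' ' && b == ' ' then rnaSqueeze (b :: t) else a :: rnaSqueeze (b :: t)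

def rnaHasDD : List Char → Bool
  | a :: b :: t => (a == ' ' && b == ' ') || rnaHasDD (b :: t)
  | _ => false

def rnaCap : List Char → List Char
  | [] => []
  | a :: t => PySem.Chars.upperChar a :: t

def rnaF (l : List Char) : List Char :=
  rnaSqueeze (rnaCap (List.dropWhile (· == ' ') (l.filter rnaKeep)))

-- ---- character-level facts (decided over all ASCII codes) ----
theorem is_alpha_eq_contains (c : Char) : is_alpha c = pvAlphabet.toList.contains c := by
  unfold is_alpha
  rcases hm : pvAlphabet.toList.contains c with _ | _
  · rw [PySem.Chars.isIn_eq_false_iff]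
    intro hinf
    have : c ∈ pvAlphabet.toList := hinf.subset (by simp)
    simp [List.contains_eq_mem] at hm
    exact hm this
  · have : c ∈ pvAlphabet.toList := by simpa [List.contains_eq_mem] using hm
    obtain ⟨u, v, huv⟩ := List.append_of_mem this
    rw [show PySem.Chars.isIn [c] pvAlphabet.toList = true from ?_]
    rw [PySem.Chars.isIn_iff_infix, huv]
    exact ⟨u, v, by simp⟩

set_option maxRecDepth 4000 in
theorem rnaLetter_eq (c : Char) (h : pvDomChar c = true) : rnaLetter c = is_alpha c := by
  rw [is_alpha_eq_contains]
  have hlt : c.toNat < 128 := by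
    unfold pvDomChar at h
    simp only [Bool.or_eq_true, Bool.and_eq_true, decide_eq_true_eq, beq_iff_eq] at h
    omega
  have key : ∀ n ∈ List.range 128,
      rnaLetter (Char.ofNat n) = (pvAlphabet.toList.contains (Char.ofNat n)) := by decide
  have := key c.toNat (List.mem_range.mpr hlt)
  rwa [Char.ofNat_toNat] at this

theorem rnaLetter_ne_space (c : Char) (h : rnaLetter c = true) : (c == ' ') = false := by
  by_contra hc
  have : c = ' ' := by simpa [beq_iff_eq] using hc
  subst this
  simp [rnaLetter] at h

-- ---- A-side pipeline characterization ----
theorem rnaFilter_aux (l r : List Char) :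
    l.foldl (fun r c => if is_alpha c || c == ' ' then r ++ [c] else r) r = r ++ l.filter rnaKeep := by
  induction l generalizing r with
  | nil => simp
  | cons c t ih =>
    rw [List.foldl_cons, List.filter_cons]
    show List.foldl _ (if rnaKeep c then r ++ [c] else r) t = _
    cases hk : rnaKeep c
    · simp only [Bool.false_eq_true, if_false]
      rw [ih]
    · simp only [if_true]
      rw [ih]
      simp

theorem rnaFilter_eq (l : List Char) : rnaFilter l = l.filter rnaKeep := by
  unfold rnaFilter
  simpa using rnaFilter_aux l []

theorem rnaStrip_eq (l : List Char) : rnaStrip l = List.dropWhile (· == ' ') l := by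
  induction l with
  | nil => rfl
  | cons c t ih => simp only [rnaStrip, List.dropWhile_cons]; split <;> simp_all

theorem rnaRep_cons_cons (c d : Char) (t : List Char) (h : ¬(c = ' ' ∧ d = ' ')) :
    rnaRep (c :: d :: t) = c :: rnaRep (d :: t) := by
  rw [rnaRep.eq_def]
  split
  · rename_i heq; simp at heq
  · rename_i heq
    injection heq with h1 h2
    injection h2 with h3 _
    exact absurd ⟨h1, h3⟩ h
  · rename_i heq
    injection heq with h1 h2
    subst h1; subst h2
    rfl

theorem rnaRep_go (fuel : Nat) (l acc : List Char) (h : l.length ≤ fuel) :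
    PySem.Chars.replace.go [' ', ' '] [' '] fuel l acc = acc.reverse ++ rnaRep l := by
  induction fuel generalizing l acc with
  | zero =>
    have : l = [] := by cases l <;> simp_all
    subst this
    rw [PySem.Chars.replace.go]
    simp [rnaRep]
  | succ fuel ih =>
    cases l with
    | nil =>
      rw [PySem.Chars.replace.go]
      · simp [rnaRep]
      · omega
    | cons c t =>
      rw [PySem.Chars.replace.go]
      by_cases hp : [' ', ' '].isPrefixOf (c :: t) = true
      · rw [if_pos hp]
        cases t with
        | nil => simp [List.isPrefixOf] at hp
        | cons d t' =>
          simp only [List.isPrefixOf, Bool.and_eq_true, beq_iff_eq] at hp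
          obtain ⟨h1, h2, -⟩ := hp
          subst h1; subst h2
          rw [show List.drop [' ', ' '].length (' ' :: ' ' :: t') = t' from rfl]
          rw [ih t' ([' '].reverse ++ acc) (by simp at h ⊢; omega)]
          show _ = acc.reverse ++ (' ' :: rnaRep t')
          simp
      · rw [if_neg hp]
        rw [ih t (c :: acc) (by simp at h ⊢; omega)]
        cases t with
        | nil => simp [rnaRep]
        | cons d t' =>
          have hne : ¬(c = ' ' ∧ d = ' ') := by
            intro ⟨h1, h2⟩
            subst h1; subst h2
            simp [List.isPrefixOf] at hp
          rw [rnaRep_cons_cons c d t' hne]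
          simp

theorem rnaReplace_eq (l : List Char) :
    PySem.Chars.replace l [' ', ' '] [' '] = rnaRep l := by
  rw [PySem.Chars.replace]
  simp only [List.isEmpty_cons, Bool.false_eq_true, if_false]
  simpa using rnaRep_go l.length l [] le_rfl

theorem rnaRep_cons' (c : Char) (t : List Char)
    (hne : ∀ t1, c = ' ' → t = ' ' :: t1 → False) : rnaRep (c :: t) = c :: rnaRep t := by
  rw [rnaRep.eq_def]
  split
  · rename_i heq; simp at heq
  · rename_i heq
    injection heq with h1 h2
    exact absurd (hne _ h1 h2) not_false
  · rename_i heq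
    injection heq with h1 h2
    subst h1; subst h2
    rfl

theorem rnaRep_two (t : List Char) : rnaRep (' ' :: ' ' :: t) = ' ' :: rnaRep t := rfl

theorem rnaRep_length_le (l : List Char) : (rnaRep l).length ≤ l.length := by
  induction l using rnaRep.induct with
  | case1 => simp [rnaRep]
  | case2 t ih => rw [rnaRep_two]; simp only [List.length_cons]; omega
  | case3 c t hne ih =>
    rw [rnaRep_cons' c t hne]
    simp only [List.length_cons]
    omega

theorem rnaRep_length_lt (l : List Char) (h : rnaHasDD l = true) :
    (rnaRep l).length < l.length := by
  induction l using rnaRep.induct with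
  | case1 => simp [rnaHasDD] at h
  | case2 t ih =>
    have := rnaRep_length_le t
    rw [rnaRep_two]
    simp only [List.length_cons]
    omega
  | case3 c t hne ih =>
    cases t with
    | nil => simp [rnaHasDD] at h
    | cons d t' =>
      rw [rnaRep_cons' c (d :: t') hne]
      have htl : rnaHasDD (d :: t') = true := by
        simp only [rnaHasDD, Bool.or_eq_true, Bool.and_eq_true, beq_iff_eq] at h ⊢
        rcases h with ⟨h1, h2⟩ | h'
        · exact absurd (hne t' h1 (by rw [h2])) not_false
        · exact h'
      have := ih htl
      simp only [List.length_cons] at this ⊢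
      omega

theorem rnaRep_head? (l : List Char) : (rnaRep l).head? = l.head? := by
  induction l using rnaRep.induct with
  | case1 => rfl
  | case2 t ih => rw [rnaRep_two]; rfl
  | case3 c t hne ih => rw [rnaRep_cons' c t hne]; rfl

theorem rnaSqueeze_cons (c : Char) (l : List Char) :
    rnaSqueeze (c :: l) =
      if c == ' ' && (l.head? == some ' ') then rnaSqueeze l else c :: rnaSqueeze l := by
  cases l <;> simp [rnaSqueeze]

theorem rnaSqueeze_rep (l : List Char) : rnaSqueeze (rnaRep l) = rnaSqueeze l := by
  induction l using rnaRep.induct with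
  | case1 => rfl
  | case2 t ih =>
    rw [rnaRep_two, rnaSqueeze_cons, rnaRep_head?, ih, ← rnaSqueeze_cons,
      show rnaSqueeze (' ' :: ' ' :: t) = rnaSqueeze (' ' :: t) from by simp [rnaSqueeze]]
  | case3 c t hne ih =>
    rw [rnaRep_cons' c t hne, rnaSqueeze_cons, rnaRep_head?, ih, ← rnaSqueeze_cons]

theorem rnaHasDD_iff (l : List Char) : rnaHasDD l = true ↔ [' ', ' '] <:+: l := by
  induction l with
  | nil => simp [rnaHasDD]
  | cons a t ih =>
    cases t with
    | nil =>
      simp only [rnaHasDD, Bool.false_eq_true, false_iff]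
      intro h
      have := h.length_le
      simp at this
    | cons b t' =>
      rw [List.infix_cons_iff]
      simp only [rnaHasDD, Bool.or_eq_true, Bool.and_eq_true, beq_iff_eq, ih,
        List.cons_prefix_cons, List.nil_prefix, and_true]
      constructor
      · rintro (⟨h1, h2⟩ | h') 
        · exact Or.inl ⟨h1.symm, h2.symm⟩
        · exact Or.inr h'
      · rintro (⟨h1, h2⟩ | h')
        · exact Or.inl ⟨h1.symm, h2.symm⟩
        · exact Or.inr h'

theorem rnaIsIn_eq_hasDD (l : List Char) : PySem.Chars.isIn [' ', ' '] l = rnaHasDD l := by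
  cases h : rnaHasDD l
  · rw [PySem.Chars.isIn_eq_false_iff]
    intro hinf
    rw [← rnaHasDD_iff] at hinf
    simp [h] at hinf
  · have := (rnaHasDD_iff l).mp h
    rw [← PySem.Chars.isIn_iff_infix] at this
    exact this

theorem rnaSqueeze_of_no_dd (l : List Char) (h : rnaHasDD l = false) : rnaSqueeze l = l := by
  induction l with
  | nil => rfl
  | cons a t ih =>
    rw [rnaSqueeze_cons]
    cases t with
    | nil => simp [rnaSqueeze]
    | cons b t' =>
      simp only [rnaHasDD, Bool.or_eq_false_iff] at h
      have hc : (a == ' ' && ((b :: t').head? == some ' ')) = false := by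
        simpa using h.1
      simp only [hc, Bool.false_eq_true, if_false]
      rw [ih h.2]

theorem rnaCollapse_eq (fuel : Nat) (l : List Char) (h : l.length ≤ fuel) :
    rnaCollapse fuel l = rnaSqueeze l := by
  induction fuel generalizing l with
  | zero =>
    have : l = [] := by cases l <;> simp_all
    subst this
    rfl
  | succ fuel ih =>
    simp only [rnaCollapse]
    rw [rnaIsIn_eq_hasDD]
    cases hdd : rnaHasDD l
    · simp only [Bool.false_eq_true, if_false]
      rw [rnaSqueeze_of_no_dd l hdd]
    · simp only [if_true]
      rw [rnaReplace_eq]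
      have hlt := rnaRep_length_lt l hdd
      rw [ih (rnaRep l) (by omega), rnaSqueeze_rep]

theorem rnaCap_if (r : List Char) : rnaCapFirst r = rnaCap r := by
  cases r <;> simp [rnaCapFirst, rnaCap]

theorem rnaA_eq (s : String) : remove_not_alpha s = String.ofList (rnaF s.toList) := by
  unfold remove_not_alpha rnaF
  show String.ofList (rnaCollapse (rnaCapFirst (rnaStrip (rnaFilter s.toList))).length
    (rnaCapFirst (rnaStrip (rnaFilter s.toList)))) = _
  rw [rnaFilter_eq, rnaStrip_eq, rnaCap_if, rnaCollapse_eq _ _ le_rfl]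

-- ---- B-side: the fold computes the same pipeline ----
theorem rnaSqueeze_nil_iff (l : List Char) : rnaSqueeze l = [] ↔ l = [] := by
  induction l with
  | nil => exact ⟨fun _ => rfl, fun _ => rfl⟩
  | cons a t ih =>
    rw [rnaSqueeze_cons]
    split
    · rename_i hc
      have ht : t ≠ [] := by intro h; subst h; simp at hc
      simp [ih, ht]
    · simp

theorem rnaSqueeze_getLast? (l : List Char) : (rnaSqueeze l).getLast? = l.getLast? := by
  induction l with
  | nil => rfl
  | cons a t ih =>
    rw [rnaSqueeze_cons]
    split
    · rename_i hc
      cases t with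
      | nil => simp at hc
      | cons b t' => rw [ih, List.getLast?_cons_cons]
    · cases t with
      | nil => rfl
      | cons b t' =>
        have hne : rnaSqueeze (b :: t') ≠ [] := by
          rw [ne_eq, rnaSqueeze_nil_iff]; simp
        obtain ⟨x, xs, hxs⟩ := List.exists_cons_of_ne_nil hne
        rw [hxs, List.getLast?_cons_cons, ← hxs, ih, List.getLast?_cons_cons]

theorem rnaSqueeze_append1 (l : List Char) (c : Char) :
    rnaSqueeze (l ++ [c]) =
      if l.getLast? == some ' ' && c == ' ' then rnaSqueeze l else rnaSqueeze l ++ [c] := by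
  induction l with
  | nil => simp [rnaSqueeze]
  | cons a t ih =>
    cases t with
    | nil =>
      by_cases ha : a = ' ' <;> by_cases hc : c = ' ' <;>
        simp [rnaSqueeze, ha, hc]
    | cons b t' =>
      simp only [List.cons_append]
      rw [rnaSqueeze_cons a (b :: (t' ++ [c]))]
      rw [show ((b :: (t' ++ [c])).head? == some ' ') = (b == ' ') from by simp]
      rw [show (b :: (t' ++ [c])) = (b :: t') ++ [c] from by simp, ih]
      rw [rnaSqueeze_cons a (b :: t')]
      rw [show ((b :: t').head? == some ' ') = (b == ' ') from by simp]
      rw [List.getLast?_cons_cons]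
      by_cases hab : (a == ' ' && b == ' ') = true <;>
        by_cases h2 : ((b :: t').getLast? == some ' ' && c == ' ') = true <;>
          simp [hab, h2]

theorem rnaCap_ne_nil (l : List Char) (h : l ≠ []) : rnaCap l ≠ [] := by
  cases l with
  | nil => exact absurd rfl h
  | cons a t => simp [rnaCap]

theorem rnaCap_append (l : List Char) (c : Char) (h : l ≠ []) :
    rnaCap (l ++ [c]) = rnaCap l ++ [c] := by
  cases l with
  | nil => exact absurd rfl h
  | cons a t => simp [rnaCap]

theorem rnaB_step (p : List Char) (c : Char) (hc : pvDomChar c = true) :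
    (if ('a' ≤ c && c ≤ 'z') || ('A' ≤ c && c ≤ 'Z') then
        rnaF p ++ [if (rnaF p).isEmpty then PySem.Chars.upperChar c else c]
      else if c == ' ' && !(rnaF p).isEmpty && (rnaF p).getLast? != some ' ' then rnaF p ++ [' ']
      else rnaF p) = rnaF (p ++ [c]) := by
  have hstep : (('a' ≤ c && c ≤ 'z') || ('A' ≤ c && c ≤ 'Z')) = rnaLetter c := rfl
  rw [hstep]
  unfold rnaF
  rw [List.filter_append]
  set S := List.dropWhile (· == ' ') (List.filter rnaKeep p) with hS
  cases hl : rnaLetter c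
  · -- c is not a letter
    simp only [Bool.false_eq_true, if_false]
    by_cases hsp : c = ' '
    · -- c is a space: it is kept by the filter
      subst hsp
      have hk : rnaKeep ' ' = true := by simp [rnaKeep]
      rw [show List.filter rnaKeep [' '] = [' '] from by simp [hk]]
      rw [List.dropWhile_append, ← hS]
      by_cases hse : S.isEmpty = true
      · -- everything kept so far was spaces: output still empty
        have hSnil : S = [] := by simpa [List.isEmpty_iff] using hse
        rw [if_pos hse, hSnil]
        simp [rnaCap, rnaSqueeze, List.dropWhile]
      · have hSne : S ≠ [] := by simpa [List.isEmpty_iff] using hse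
        rw [if_neg hse, rnaCap_append S ' ' hSne, rnaSqueeze_append1]
        have hout : (rnaSqueeze (rnaCap S)).isEmpty = false := by
          simp only [List.isEmpty_eq_false_iff, ne_eq, rnaSqueeze_nil_iff]
          exact rnaCap_ne_nil S hSne
        rw [rnaSqueeze_getLast?]
        simp only [hout, Bool.not_false, Bool.and_true, beq_self_eq_true, Bool.true_and]
        by_cases hlast : (rnaCap S).getLast? = some ' ' <;> simp [hlast]
    · -- c is neither a letter nor a space: filtered out, nothing changes
      have hk : rnaKeep c = false := by
        unfold rnaKeep
        rw [← rnaLetter_eq c hc, hl]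
        simp [hsp]
      rw [show List.filter rnaKeep [c] = [] from by simp [hk]]
      simp only [List.append_nil, ← hS]
      rw [if_neg (by simp [hsp])]
  · -- c is a letter: kept, never a space
    simp only [if_true]
    have hk : rnaKeep c = true := by
      unfold rnaKeep
      rw [← rnaLetter_eq c hc, hl]
      rfl
    have hns : (c == ' ') = false := rnaLetter_ne_space c hl
    have hne : c ≠ ' ' := by simpa using hns
    rw [show List.filter rnaKeep [c] = [c] from by simp [hk]]
    rw [List.dropWhile_append, ← hS]
    rw [show List.dropWhile (· == ' ') [c] = [c] from by simp [List.dropWhile, hns]]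
    by_cases hse : S.isEmpty = true
    · have hSnil : S = [] := by simpa [List.isEmpty_iff] using hse
      rw [if_pos hse, hSnil]
      simp [rnaCap, rnaSqueeze]
    · have hSne : S ≠ [] := by simpa [List.isEmpty_iff] using hse
      rw [if_neg hse, rnaCap_append S c hSne, rnaSqueeze_append1]
      have hout : (rnaSqueeze (rnaCap S)).isEmpty = false := by
        simp only [List.isEmpty_eq_false_iff, ne_eq, rnaSqueeze_nil_iff]
        exact rnaCap_ne_nil S hSne
      rw [hout, if_neg (by simp)]
      simp
      exact fun _ => hne

theorem rnaB_fold (p : List Char) (h : ∀ c ∈ p, pvDomChar c = true) :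
    p.foldl (fun out c =>
      if ('a' ≤ c && c ≤ 'z') || ('A' ≤ c && c ≤ 'Z') then
        out ++ [if out.isEmpty then PySem.Chars.upperChar c else c]
      else if c == ' ' && !out.isEmpty && out.getLast? != some ' ' then out ++ [' ']
      else out) [] = rnaF p := by
  induction p using List.reverseRecOn with
  | nil => rfl
  | append_singleton p c ih =>
    have hp : ∀ x ∈ p, pvDomChar x = true := fun x hx => h x (List.mem_append.mpr (Or.inl hx))
    have hc : pvDomChar c = true := h c (List.mem_append.mpr (Or.inr (by simp)))
    rw [List.foldl_concat, ih hp]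
    exact rnaB_step p c hc

-- ===== VERDICT (by name: the statement is the Claim_ definition above) =====
theorem remove_not_alpha_spec : Claim_equal_remove_not_alpha := by
  intro s hdom
  unfold Spec_remove_not_alpha remove_not_alpha_alt
  rw [rnaA_eq, rnaB_fold]
  intro c hc
  have hall : s.toList.all pvDomChar = true := hdom
  exact List.all_eq_true.mp hall c hc
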